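-- pv_equiv track=rewrite | github.com/rigizer/algorithm | 백준/Silver/14291. Diwali lightings （Large）/Diwali lightings （Large）.py | calc
-- ===== SOURCE A (Python) =====
-- def calc(s, i, j):
--     length = len(s)
--     blue_count = s.count('B')
--     total_len = j - i + 1
--
--     start_idx = (i - 1) % length
--     full_patterns = total_len // length
--     remainder = total_len % length
--     result = full_patterns * blue_count
--
--     for k in range(remainder):
--         if s[(start_idx + k) % length] == 'B':
--             result += 1
--
--     return result
-- ===== SOURCE B (Python) =====
-- def calc(s, i, j):
--     length = len(s)
--     total = 0
--     prefix = [0]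
--     for ch in s:
--         if ch == 'B':
--             total += 1
--         prefix.append(total)
--
--     def count(p):
--         # number of 'B' in the first p positions of the infinite repetition of s
--         return (p // length) * prefix[length] + prefix[p % length]
--
--     return count(j) - count(i - 1)
-- ===== Notes on version B (the rewrite author's own statement) =====
-- stated objective: alternative
-- what changed: Replaces A's explicit remainder loop over pattern positions with a prefix-count table built in one pass and a closed-form cumulative helper count(p) = (p//len)*prefix[len] + prefix[p%len], returning count(j)-count(i-1).
import Mathlib
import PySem

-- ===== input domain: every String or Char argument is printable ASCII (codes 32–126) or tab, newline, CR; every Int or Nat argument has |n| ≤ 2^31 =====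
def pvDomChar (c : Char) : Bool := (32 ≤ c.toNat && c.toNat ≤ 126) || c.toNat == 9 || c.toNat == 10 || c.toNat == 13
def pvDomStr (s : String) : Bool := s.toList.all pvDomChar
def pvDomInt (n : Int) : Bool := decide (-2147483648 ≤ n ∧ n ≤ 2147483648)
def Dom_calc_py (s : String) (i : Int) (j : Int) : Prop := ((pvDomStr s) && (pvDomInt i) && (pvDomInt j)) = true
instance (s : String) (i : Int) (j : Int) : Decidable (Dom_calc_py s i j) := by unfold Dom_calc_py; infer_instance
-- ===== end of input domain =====

-- B replaces A's remainder loop over pattern positions by a prefix-count table and a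
-- closed-form cumulative helper; same O(len s) cost, different decomposition ("alternative").


-- ===== PORT A =====
def calc_py (s : String) (i : Int) (j : Int) : Int :=
  let length : Int := PySem.Str.len s
  let blue_count : Int := (PySem.Str.count s "B" : Int)
  let total_len : Int := j - i + 1
  let start_idx : Int := PySem.Int.mod (i - 1) length
  let full_patterns : Int := PySem.Int.floordiv total_len length
  let remainder : Int := PySem.Int.mod total_len length
  let result : Int := full_patterns * blue_count
  (PySem.List.pyRange 0 remainder 1).foldl
    (fun result k =>
      if PySem.Str.pyGet? s (PySem.Int.mod (start_idx + k) length) = some 'B' then result + 1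
      else result)
    result

-- ===== PORT B =====
def calc_py_alt (s : String) (i : Int) (j : Int) : Int :=
  let length : Int := PySem.Str.len s
  let st : List Int × Int :=
    s.toList.foldl
      (fun (st : List Int × Int) ch =>
        let total : Int := if ch = 'B' then st.2 + 1 else st.2
        (st.1 ++ [total], total))
      ([0], 0)
  let pref : List Int := st.1
  let count : Int → Int := fun p =>
    PySem.Int.floordiv p length * (PySem.List.pyGet? pref length).getD 0
      + (PySem.List.pyGet? pref (PySem.Int.mod p length)).getD 0
  count j - count (i - 1)

-- ===== PRECONDITION & SPEC =====
-- Pre_ excludes only the empty string, on which the Python A raises ZeroDivisionError ((i-1) % 0).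
def Pre_calc_py (s : String) (i : Int) (j : Int) : Prop := s ≠ ""
instance (s : String) (i : Int) (j : Int) : Decidable (Pre_calc_py s i j) := by
  unfold Pre_calc_py; infer_instance
def pvWitness_calc_py : String × Int × Int := ("BRB", 2, 10)
def Spec_calc_py (s : String) (i : Int) (j : Int) (out : Int) : Prop := out = calc_py_alt s i j
instance (s : String) (i : Int) (j : Int) (out : Int) : Decidable (Spec_calc_py s i j out) := by
  unfold Spec_calc_py; infer_instance

-- ===== CLAIM (what is proved, stated in full; the proofs are below) =====
def Claim_equal_calc_py : Prop := ∀ (s : String) (i : Int) (j : Int), Dom_calc_py s i j → Pre_calc_py s i j → Spec_calc_py s i j (calc_py s i j)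

-- ===== LEMMAS AND PROOFS =====

-- ## proof-side notions
def pvDelta (cs : List Char) (x : Nat) : Int := if cs.getD x ' ' = 'B' then 1 else 0
def pvP (cs : List Char) (r : Nat) : Int := ((cs.take r).count 'B' : Int)
def pvF (cs : List Char) (x : Int) : Int :=
  (x / (cs.length : Int)) * ((cs.count 'B' : Int)) + pvP cs ((x % (cs.length : Int)).toNat)
def pvS (cs : List Char) (m : Int) (r : Nat) : Int :=
  ((List.range r).map (fun k => pvDelta cs (((m + (k : Int)) % (cs.length : Int)).toNat))).sum

theorem pvLen_pos (cs : List Char) (h : cs ≠ []) : (0 : Int) < (cs.length : Int) := by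
  simpa using Nat.pos_of_ne_zero (fun hh => h (List.eq_nil_of_length_eq_zero hh))

theorem pvP_succ (cs : List Char) (r : Nat) (h : r < cs.length) :
    pvP cs (r + 1) = pvP cs r + pvDelta cs r := by
  rw [pvP, pvP, pvDelta, List.take_succ, List.getElem?_eq_getElem h]
  rw [List.getD_eq_getElem?_getD, List.getElem?_eq_getElem h]
  simp only [Option.toList_some, List.count_append, Option.getD_some, List.count_singleton]
  push_cast
  split_ifs with hB <;> simp_all

theorem pvP_len (cs : List Char) : pvP cs cs.length = (cs.count 'B' : Int) := by
  simp [pvP]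

theorem pvF_succ (cs : List Char) (h : cs ≠ []) (x : Int) :
    pvF cs (x + 1) = pvF cs x + pvDelta cs ((x % (cs.length : Int)).toNat) := by
  have hL : (0 : Int) < (cs.length : Int) := pvLen_pos cs h
  set L : Int := (cs.length : Int) with hLdef
  have hr0 : 0 ≤ x % L := Int.emod_nonneg x (by omega)
  have hrL : x % L < L := Int.emod_lt_of_pos x hL
  have hmod : (x + 1) % L = (x % L + 1) % L := by
    rw [Int.emod_add_emod]
  have hid : L * (x / L) + x % L = x := Int.ediv_add_emod x L
  have hid1 : L * ((x + 1) / L) + (x + 1) % L = x + 1 := Int.ediv_add_emod (x + 1) L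
  by_cases hcase : x % L + 1 < L
  · have hm : (x + 1) % L = x % L + 1 := by
      rw [hmod, Int.emod_eq_of_lt (by omega) hcase]
    have hd : (x + 1) / L = x / L := by
      have : L * ((x + 1) / L) = L * (x / L) := by omega
      exact mul_left_cancel₀ (by omega) this
    have htn : ((x + 1) % L).toNat = (x % L).toNat + 1 := by omega
    rw [pvF, pvF, hd, htn, pvP_succ cs ((x % L).toNat) (by omega)]
    ring
  · have hm : (x + 1) % L = 0 := by
      have : x % L + 1 = L := by omega
      rw [hmod, this, Int.emod_self]
    have hd : (x + 1) / L = x / L + 1 := by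
      have : L * ((x + 1) / L) = L * (x / L + 1) := by
        have h2 : L * (x / L + 1) = L * (x / L) + L := by ring
        omega
      exact mul_left_cancel₀ (by omega) this
    have hlast : (x % L).toNat + 1 = cs.length := by omega
    have hblue : (cs.count 'B' : Int) = pvP cs ((x % L).toNat) + pvDelta cs ((x % L).toNat) := by
      rw [← pvP_len cs, ← hlast, pvP_succ cs ((x % L).toNat) (by omega)]
    rw [pvF, pvF, hd, hm]
    have h0 : pvP cs ((0:Int).toNat) = 0 := by simp [pvP]
    rw [h0, hblue]
    ring

theorem pvF_sum (cs : List Char) (h : cs ≠ []) (x : Int) (r : Nat) :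
    pvF cs (x + r) = pvF cs x + pvS cs x r := by
  induction r with
  | zero => simp [pvS]
  | succ n ih =>
    have hx : x + ((n : Int) + 1) = (x + n) + 1 := by ring
    rw [pvS]
    push_cast
    rw [hx, pvF_succ cs h (x + n), ih, List.range_succ]
    simp [pvS]
    ring

theorem pvF_addL (cs : List Char) (h : cs ≠ []) (x : Int) :
    pvF cs (x + (cs.length : Int)) = pvF cs x + (cs.count 'B' : Int) := by
  have hL : (0 : Int) < (cs.length : Int) := pvLen_pos cs h
  rw [pvF, pvF]
  have hd : (x + (cs.length : Int)) / (cs.length : Int) = x / (cs.length : Int) + 1 := by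
    have := Int.add_mul_ediv_right x 1 (c := (cs.length : Int)) (by omega)
    simpa using this
  have hm : (x + (cs.length : Int)) % (cs.length : Int) = x % (cs.length : Int) := by
    simpa using Int.add_mul_emod_self_left (a := x) (b := (cs.length : Int)) (c := 1)
  rw [hd, hm]
  ring

theorem pvF_period (cs : List Char) (h : cs ≠ []) (x : Int) (q : Int) :
    pvF cs (x + q * (cs.length : Int)) = pvF cs x + q * (cs.count 'B' : Int) := by
  induction q using Int.induction_on with
  | zero => simp
  | succ n ih =>
    have hx : x + ((n : Int) + 1) * (cs.length : Int)
        = (x + (n : Int) * (cs.length : Int)) + (cs.length : Int) := by ring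
    rw [hx, pvF_addL cs h, ih]
    ring
  | pred n ih =>
    have hstep := pvF_addL cs h (x + (-(n : Int) - 1) * (cs.length : Int))
    have hx : (x + (-(n : Int) - 1) * (cs.length : Int)) + (cs.length : Int)
        = x + (-(n : Int)) * (cs.length : Int) := by ring
    rw [hx, ih] at hstep
    have hres : pvF cs (x + (-(n : Int) - 1) * (cs.length : Int))
        = pvF cs x + -(n : Int) * (cs.count 'B' : Int) - (cs.count 'B' : Int) := by omega
    rw [hres]
    ring

theorem pvF_main (cs : List Char) (h : cs ≠ []) (m n : Int) :
    pvF cs (m + n) - pvF cs m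
      = (n / (cs.length : Int)) * (cs.count 'B' : Int)
        + pvS cs m ((n % (cs.length : Int)).toNat) := by
  have hL : (0 : Int) < (cs.length : Int) := pvLen_pos cs h
  have hr0 : 0 ≤ n % (cs.length : Int) := Int.emod_nonneg n (by omega)
  have hsplit : m + n = (m + ((n % (cs.length : Int)).toNat : Int))
      + (n / (cs.length : Int)) * (cs.length : Int) := by
    have h1 := Int.ediv_add_emod n (cs.length : Int)
    have h2 : (n / (cs.length : Int)) * (cs.length : Int)
        = (cs.length : Int) * (n / (cs.length : Int)) := by ring
    omega
  rw [hsplit, pvF_period cs h _ (n / (cs.length : Int)),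
    pvF_sum cs h m ((n % (cs.length : Int)).toNat)]
  ring

theorem pvS_emod (cs : List Char) (h : cs ≠ []) (m : Int) (r : Nat) :
    pvS cs (m % (cs.length : Int)) r = pvS cs m r := by
  rw [pvS, pvS]
  congr 1
  apply List.map_congr_left
  intro k _
  rw [Int.emod_add_emod]

-- Python's s.count('B') is the character count
theorem pvCountGo (fuel : Nat) (l : List Char) (acc : Nat) (h : l.length ≤ fuel) :
    PySem.Chars.count.go ['B'] fuel l acc = acc + l.count 'B' := by
  induction fuel generalizing l acc with
  | zero =>
    have : l = [] := List.eq_nil_of_length_eq_zero (by omega)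
    subst this
    simp [PySem.Chars.count.go]
  | succ n ih =>
    cases l with
    | nil => simp [PySem.Chars.count.go]
    | cons c t =>
      rw [PySem.Chars.count.go]
      by_cases hc : c = 'B'
      · subst hc
        have hp : List.isPrefixOf ['B'] ('B' :: t) = true := by
          simp [List.isPrefixOf]
        rw [if_pos hp]
        simp only [List.length_cons] at h
        rw [ih _ _ (by simpa using Nat.le_of_succ_le_succ h)]
        simp
        omega
      · have hp : List.isPrefixOf ['B'] (c :: t) = false := by
          simp [List.isPrefixOf]
          exact fun hh => hc hh.symm
        rw [if_neg (by simp [hp])]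
        simp only [List.length_cons] at h
        rw [ih _ _ (by omega)]
        simp [hc]

theorem pvStrCount (s : String) : PySem.Str.count s "B" = s.toList.count 'B' := by
  rw [PySem.Str.count_eq]
  have hB : ("B" : String).toList = ['B'] := rfl
  rw [hB, PySem.Chars.count, if_neg (by simp), pvCountGo _ _ _ le_rfl]
  omega

-- A's remainder loop computes init + pvS
theorem pvLoopS (cs : List Char) (h : cs ≠ []) (start : Int) (r : Nat) (init : Int) :
    ((List.range r).map (fun k : Nat => (0 : Int) + (k : Int))).foldl
      (fun acc k =>
        if PySem.List.pyGet? cs ((start + k) % (cs.length : Int)) = some 'B' then acc + 1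
        else acc)
      init
    = init + pvS cs start r := by
  have hL : (0 : Int) < (cs.length : Int) := pvLen_pos cs h
  induction r generalizing init with
  | zero => simp [pvS]
  | succ n ih =>
    rw [List.range_succ, List.map_append, List.foldl_append, ih]
    set idx : Int := (start + (0 + (n : Int))) % (cs.length : Int) with hidx
    have h0 : 0 ≤ idx := Int.emod_nonneg _ (by omega)
    have hlt : idx < (cs.length : Int) := Int.emod_lt_of_pos _ hL
    have htn : idx.toNat < cs.length := by omega
    have hget : PySem.List.pyGet? cs idx = some (cs[idx.toNat]'htn) := by
      rw [PySem.List.pyGet?_of_nonneg cs h0, List.getElem?_eq_getElem htn]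
    have hsum : pvS cs start (n + 1) = pvS cs start n + pvDelta cs idx.toNat := by
      rw [pvS, pvS, List.range_succ]
      simp [hidx]
    rw [hsum]
    simp only [List.map_cons, List.map_nil, List.foldl_cons, List.foldl_nil]
    rw [← hidx, hget]
    rw [pvDelta, List.getD_eq_getElem?_getD, List.getElem?_eq_getElem htn]
    simp only [Option.getD_some]
    split_ifs with h1 h2 h3
    · ring
    · exact absurd (Option.some_inj.mp h1) h2
    · exact absurd (congrArg some h3) h1
    · ring

theorem pvA_char (s : String) (h : s.toList ≠ []) (i j : Int) :
    calc_py s i j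
      = ((j - i + 1) / (s.toList.length : Int)) * (s.toList.count 'B' : Int)
        + pvS s.toList (i - 1) (((j - i + 1) % (s.toList.length : Int)).toNat) := by
  have hL : (0 : Int) < (s.toList.length : Int) := pvLen_pos s.toList h
  have hr0 : 0 ≤ (j - i + 1) % (s.toList.length : Int) :=
    Int.emod_nonneg _ (by omega)
  rw [calc_py]
  simp only [PySem.Str.len_eq, PySem.Int.mod_eq_emod_of_pos hL,
    PySem.Int.floordiv_eq_ediv_of_pos hL, pvStrCount, PySem.Str.pyGet?_eq,
    PySem.Chars.pyGet?_eq_listPyGet?]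
  rw [PySem.List.pyRange_one, sub_zero]
  rw [pvLoopS s.toList h ((i - 1) % (s.toList.length : Int))
    (((j - i + 1) % (s.toList.length : Int)).toNat)]
  rw [pvS_emod s.toList h]

-- B's prefix-building fold, characterised
theorem pvFoldPrefix (cs : List Char) : ∀ (pre : List Int) (t : Int),
    cs.foldl
      (fun (st : List Int × Int) ch =>
        let total : Int := if ch = 'B' then st.2 + 1 else st.2
        (st.1 ++ [total], total))
      (pre, t)
    = (pre ++ (List.range cs.length).map (fun r => t + ((cs.take (r + 1)).count 'B' : Int)),
       t + (cs.count 'B' : Int)) := by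
  induction cs with
  | nil => intro pre t; simp
  | cons c tl ih =>
    intro pre t
    simp only [List.foldl_cons]
    rw [ih]
    have hcount : ∀ l : List Char, ((c :: l).count 'B' : Int)
        = (if c = 'B' then t + 1 else t) - t + (l.count 'B' : Int) := by
      intro l
      rw [List.count_cons]
      by_cases hc : c = 'B' <;> simp [hc] <;> push_cast <;> ring
    refine Prod.ext ?_ ?_
    · simp only [List.length_cons, List.range_succ_eq_map, List.map_cons, List.map_map]
      by_cases hc : c = 'B' <;>
        simp [hc, Function.comp] <;>
        intro r _ <;> ring
    · simp only
      rw [hcount tl]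
      ring

-- the built prefix table is the table of absolute prefix counts
theorem pvPrefixList (cs : List Char) :
    (cs.foldl
      (fun (st : List Int × Int) ch =>
        let total : Int := if ch = 'B' then st.2 + 1 else st.2
        (st.1 ++ [total], total))
      ([0], 0)).1
    = (List.range (cs.length + 1)).map (pvP cs) := by
  rw [pvFoldPrefix cs [0] 0]
  simp only [List.range_succ_eq_map, List.map_cons, List.map_map]
  simp [pvP]

theorem pvPrefGet (cs : List Char) (p : Int) (h0 : 0 ≤ p) (hle : p ≤ (cs.length : Int)) :
    (PySem.List.pyGet? ((List.range (cs.length + 1)).map (pvP cs)) p).getD 0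
      = pvP cs p.toNat := by
  rw [PySem.List.pyGet?_of_nonneg _ h0]
  have hlt : p.toNat < cs.length + 1 := by omega
  simp [List.getElem?_map, List.getElem?_range, hlt]

theorem pvB_char (s : String) (h : s.toList ≠ []) (i j : Int) :
    calc_py_alt s i j = pvF s.toList j - pvF s.toList (i - 1) := by
  have hL : (0 : Int) < (s.toList.length : Int) := pvLen_pos s.toList h
  rw [calc_py_alt]
  simp only [PySem.Str.len_eq, PySem.Int.mod_eq_emod_of_pos hL,
    PySem.Int.floordiv_eq_ediv_of_pos hL, pvPrefixList]
  have hgetL : (PySem.List.pyGet? ((List.range (s.toList.length + 1)).map (pvP s.toList))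
      (s.toList.length : Int)).getD 0 = (s.toList.count 'B' : Int) := by
    rw [pvPrefGet s.toList _ (by omega) (by omega),
      show ((s.toList.length : Int)).toNat = s.toList.length from by omega]
    exact pvP_len s.toList
  have hgetM : ∀ p : Int, (PySem.List.pyGet? ((List.range (s.toList.length + 1)).map (pvP s.toList))
      (p % (s.toList.length : Int))).getD 0 = pvP s.toList ((p % (s.toList.length : Int)).toNat) := by
    intro p
    exact pvPrefGet s.toList _ (Int.emod_nonneg _ (by omega))
      (le_of_lt (Int.emod_lt_of_pos _ hL))
  rw [hgetL, hgetM, hgetM, pvF, pvF]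

theorem pvFinal (s : String) (i j : Int) (h : s ≠ "") : calc_py s i j = calc_py_alt s i j := by
  have hnil : s.toList ≠ [] := by
    intro hh
    exact h (by simpa [String.toList_eq_nil_iff] using hh)
  rw [pvA_char s hnil i j, pvB_char s hnil i j]
  have hmain := pvF_main s.toList hnil (i - 1) (j - i + 1)
  rw [show i - 1 + (j - i + 1) = j from by ring] at hmain
  rw [hmain]

-- ===== VERDICT (by name: the statement is the Claim_ definition above) =====
theorem calc_py_spec : Claim_equal_calc_py := by
  intro s i j _ hpre
  unfold Spec_calc_py
  exact pvFinal s i j hpre
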